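-- pv_equiv track=rewrite | github.com/sanghack81/RRCD | rrpcd/algo_utils.py | _unique_idxs
-- ===== SOURCE A (Python) =====
-- from typing import List, Tuple, TypeVar, Sequence
--
-- def _unique_idxs(i_xs: Sequence[int]) -> List[int]:
--     """ Returns unique values of a given sequence keeping the order based on when the value first appeared in the sequence """
--     idxs = list()
--     appeared_i_xs = set(i_xs)  # first refine
--     for idx, i_x in enumerate(i_xs):
--         if i_x in appeared_i_xs:
--             appeared_i_xs.remove(i_x)
--             idxs.append(idx)
--     return idxs
-- ===== SOURCE B (Python) =====
-- def _unique_idxs(i_xs):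
--     """ Returns unique values of a given sequence keeping the order based on when the value first appeared in the sequence """
--     unique = list(dict.fromkeys(i_xs))
--     return [i_xs.index(v) for v in unique]
-- ===== Notes on version B (the rewrite author's own statement) =====
-- stated objective: alternative
-- what changed: Replaces A's single-pass set-removal loop with a build-then-lookup structure: dict.fromkeys collects the unique values in first-appearance order, then a second pass maps each unique value to its first index via list.index.
import Mathlib
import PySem

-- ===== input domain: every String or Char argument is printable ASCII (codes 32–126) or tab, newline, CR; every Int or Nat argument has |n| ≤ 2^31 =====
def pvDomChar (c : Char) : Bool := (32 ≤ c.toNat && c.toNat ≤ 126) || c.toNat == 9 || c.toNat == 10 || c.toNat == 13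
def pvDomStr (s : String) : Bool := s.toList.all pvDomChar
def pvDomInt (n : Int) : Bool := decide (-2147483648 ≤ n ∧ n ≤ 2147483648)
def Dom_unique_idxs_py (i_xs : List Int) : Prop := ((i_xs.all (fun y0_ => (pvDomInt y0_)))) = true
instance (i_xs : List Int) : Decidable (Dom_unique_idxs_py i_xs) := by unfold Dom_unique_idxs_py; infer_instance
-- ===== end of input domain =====

-- B rebuilds the result as dict.fromkeys-dedup + a first-index lookup pass (alternative decomposition, same values).

-- ===== PORT A =====
-- the `.remove` call is guarded by the membership test, so `remove?` is always `some`;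
-- `.getD st.2` only discharges the impossible `none` (KeyError) case.
def unique_idxs_py (i_xs : List Int) : List Int :=
  (List.foldl
    (fun (st : List Int × PySem.Set Int) (p : Int × Int) =>
      if PySem.Set.contains st.2 p.2 then
        (st.1 ++ [p.1], (PySem.Set.remove? st.2 p.2).getD st.2)
      else st)
    ([], PySem.Set.ofList i_xs) (PySem.List.enumerate i_xs)).1

-- ===== PORT B =====
def unique_idxs_py_alt (i_xs : List Int) : List Int :=
  (PySem.List.dedup i_xs).map (fun v => (((PySem.List.index? i_xs v).getD 0 : Nat) : Int))

-- ===== PRECONDITION & SPEC =====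
def Spec_unique_idxs_py (i_xs : List Int) (out : List Int) : Prop := out = unique_idxs_py_alt i_xs
instance (i_xs : List Int) (out : List Int) : Decidable (Spec_unique_idxs_py i_xs out) := by unfold Spec_unique_idxs_py; infer_instance

-- ===== CLAIM (what is proved, stated in full; the proofs are below) =====
def Claim_equal_unique_idxs_py : Prop := ∀ (i_xs : List Int), Dom_unique_idxs_py i_xs → Spec_unique_idxs_py i_xs (unique_idxs_py i_xs)

-- ===== LEMMAS AND PROOFS =====

-- ordered dedup relative to an explicit "seen" list
def dd : List Int → List Int → List Int
  | _, [] => []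
  | seen, x :: t => if x ∈ seen then dd seen t else x :: dd (x :: seen) t

-- the common reference function: first-occurrence indices (relative to seen), counting from k
def ddF : List Int → List Int → Int → List Int
  | _, [], _ => []
  | seen, x :: t, k => if x ∈ seen then ddF seen t (k + 1) else k :: ddF (x :: seen) t (k + 1)

theorem dd_congr (s₁ s₂ xs : List Int) (h : ∀ y, y ∈ s₁ ↔ y ∈ s₂) : dd s₁ xs = dd s₂ xs := by
  induction xs generalizing s₁ s₂ with
  | nil => rfl
  | cons x t ih =>
    simp only [dd]
    by_cases hx : x ∈ s₁
    · rw [if_pos hx, if_pos ((h x).1 hx)]; exact ih _ _ h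
    · rw [if_neg hx, if_neg (fun hc => hx ((h x).2 hc))]
      refine congrArg _ (ih _ _ ?_)
      intro y; simp [h y]

theorem mem_dd (seen xs : List Int) (v : Int) (h : v ∈ dd seen xs) : v ∈ xs ∧ v ∉ seen := by
  induction xs generalizing seen with
  | nil => simp [dd] at h
  | cons x t ih =>
    simp only [dd] at h
    by_cases hx : x ∈ seen
    · rw [if_pos hx] at h
      rcases ih _ h with ⟨h1, h2⟩
      exact ⟨List.mem_cons_of_mem _ h1, h2⟩
    · rw [if_neg hx] at h
      rcases List.mem_cons.1 h with h | h
      · exact ⟨h ▸ List.mem_cons_self, h ▸ hx⟩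
      · rcases ih _ h with ⟨h1, h2⟩
        exact ⟨List.mem_cons_of_mem _ h1, fun hc => h2 (List.mem_cons_of_mem _ hc)⟩

theorem foldl_add_eq_dd (xs : List Int) (s : PySem.Set Int) :
    xs.foldl PySem.Set.add s = s ++ dd s xs := by
  induction xs generalizing s with
  | nil => simp [dd]
  | cons x t ih =>
    simp only [List.foldl_cons, dd]
    by_cases hx : x ∈ s
    · rw [if_pos hx, PySem.Set.add_of_mem hx, ih]
    · rw [if_neg hx, PySem.Set.add_of_not_mem hx, ih]
      rw [dd_congr (s ++ [x]) (x :: s) t (by intro y; simp [or_comm])]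
      simp

theorem dedup_eq_dd (xs : List Int) : PySem.List.dedup xs = dd [] xs := by
  rw [PySem.List.dedup_eq_ofList, PySem.Set.ofList_eq_foldl, foldl_add_eq_dd]
  simp

theorem map_index_dd (xs : List Int) : ∀ (seen : List Int) (k : Int),
    (dd seen xs).map (fun v => k + (((PySem.List.index? xs v).getD 0 : Nat) : Int)) =
      ddF seen xs k := by
  induction xs with
  | nil => intro seen k; simp [dd, ddF]
  | cons x t ih =>
    intro seen k
    simp only [dd, ddF]
    by_cases hx : x ∈ seen
    · rw [if_pos hx, if_pos hx]
      rw [List.map_congr_left (g := fun v => (k + 1) + (((PySem.List.index? t v).getD 0 : Nat) : Int)) ?_]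
      · exact ih seen (k + 1)
      · intro v hv
        rcases mem_dd _ _ _ hv with ⟨hvt, hvseen⟩
        have hne : x ≠ v := fun he => hvseen (he ▸ hx)
        rw [PySem.List.index?_cons_of_ne t hne]
        rcases PySem.List.index?_isSome_iff (xs := t) (v := v) |>.2 hvt |> Option.isSome_iff_exists.1 with ⟨n, hn⟩
        rw [PySem.List.index?_eq_idxOf?] at hn
        simp [hn]
        ring
    · rw [if_neg hx, if_neg hx]
      simp only [List.map_cons, PySem.List.index?_cons_self, Option.getD_some]
      refine congrArg₂ _ (by simp) ?_
      rw [List.map_congr_left (g := fun v => (k + 1) + (((PySem.List.index? t v).getD 0 : Nat) : Int)) ?_]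
      · exact ih (x :: seen) (k + 1)
      · intro v hv
        rcases mem_dd _ _ _ hv with ⟨hvt, hvseen⟩
        have hne : x ≠ v := fun he => hvseen (he ▸ List.mem_cons_self)
        rw [PySem.List.index?_cons_of_ne t hne]
        rcases PySem.List.index?_isSome_iff (xs := t) (v := v) |>.2 hvt |> Option.isSome_iff_exists.1 with ⟨n, hn⟩
        rw [PySem.List.index?_eq_idxOf?] at hn
        simp [hn]
        ring

theorem alt_eq_ddF (xs : List Int) : unique_idxs_py_alt xs = ddF [] xs 0 := by
  rw [unique_idxs_py_alt, dedup_eq_dd, ← map_index_dd xs [] 0]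
  simp

theorem loopA_eq_ddF (xs : List Int) : ∀ (s : PySem.Set Int) (seen acc : List Int) (k : Int),
    (∀ y ∈ xs, (y ∈ s ↔ y ∉ seen)) →
    (List.foldl
      (fun (st : List Int × PySem.Set Int) (p : Int × Int) =>
        if PySem.Set.contains st.2 p.2 then
          (st.1 ++ [p.1], (PySem.Set.remove? st.2 p.2).getD st.2)
        else st)
      (acc, s) (PySem.List.enumerate xs k)).1 = acc ++ ddF seen xs k := by
  induction xs with
  | nil => intro s seen acc k _; simp [PySem.List.enumerate_nil, ddF]
  | cons x t ih =>
    intro s seen acc k hinv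
    rw [PySem.List.enumerate_cons]
    simp only [List.foldl_cons, ddF]
    by_cases hx : x ∈ s
    · have hxseen : x ∉ seen := (hinv x List.mem_cons_self).1 hx
      have hc : PySem.Set.contains s x = true := (PySem.Set.contains_iff s x).2 hx
      rw [if_neg hxseen, if_pos hc, PySem.Set.remove?_of_mem hx, Option.getD_some]
      rw [ih (PySem.Set.discard s x) (x :: seen) (acc ++ [k]) (k + 1) ?_]
      · simp
      · intro y hy
        rw [PySem.Set.mem_discard]
        constructor
        · rintro ⟨hys, hyx⟩ hc
          rcases List.mem_cons.1 hc with h | h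
          · exact hyx h
          · exact ((hinv y (List.mem_cons_of_mem _ hy)).1 hys) h
        · intro hns
          refine ⟨(hinv y (List.mem_cons_of_mem _ hy)).2 (fun hc => hns (List.mem_cons_of_mem _ hc)),
            fun he => hns (he ▸ List.mem_cons_self)⟩
    · have hxseen : x ∈ seen := not_not.1 (fun hc => hx ((hinv x List.mem_cons_self).2 hc))
      rw [if_pos hxseen]
      have hc : PySem.Set.contains s x = false := by
        simp [PySem.Set.contains_eq_listContains]; exact hx
      simp only [hc, Bool.false_eq_true, if_false]
      exact ih s seen acc (k + 1) (fun y hy => hinv y (List.mem_cons_of_mem _ hy))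

theorem a_eq_ddF (xs : List Int) : unique_idxs_py xs = ddF [] xs 0 := by
  rw [unique_idxs_py, loopA_eq_ddF xs (PySem.Set.ofList xs) [] [] 0 ?_]
  · simp
  · intro y hy; simp [PySem.Set.mem_ofList, hy]

-- ===== VERDICT (by name: the statement is the Claim_ definition above) =====
theorem unique_idxs_py_spec : Claim_equal_unique_idxs_py := by
  intro i_xs _
  unfold Spec_unique_idxs_py
  rw [a_eq_ddF, alt_eq_ddF]
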